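-- pv_equiv track=rewrite | github.com/AaaronP/Proyecto-1-taller-programacion | codigo.py | todo
-- ===== SOURCE A (Python) =====
-- def todo(n: int, r: int) -> bool:
--     list = [int(i) for i in str(n)]
--
--     if len(list) < 4:
--         return False
--
--     if len(list) == 4:
--         list.append(0)
--
--     for i in list:
--         if list.count(i) > r:
--             return False
--
--     return True
-- ===== SOURCE B (Python) =====
-- def todo(n: int, r: int) -> bool:
--     digits = [int(c) for c in str(n)]  # same ValueError as A on a '-' sign
--     if len(digits) < 4:
--         return False
--     if len(digits) == 4:
--         digits.append(0)
--     digits.sort()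
--     run = 0
--     prev = None
--     for d in digits:
--         run = run + 1 if d == prev else 1
--         prev = d
--         if run > r:
--             return False
--     return True
-- ===== Notes on version B (the rewrite author's own statement) =====
-- stated objective: alternative
-- what changed: B sorts the digit list and scans it once for a run of equal digits longer than r (early exit), replacing A's per-element list.count rescan with a sort-then-run-length algorithm; no speed claimed since numbers have at most 11 digits.
import Mathlib
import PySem

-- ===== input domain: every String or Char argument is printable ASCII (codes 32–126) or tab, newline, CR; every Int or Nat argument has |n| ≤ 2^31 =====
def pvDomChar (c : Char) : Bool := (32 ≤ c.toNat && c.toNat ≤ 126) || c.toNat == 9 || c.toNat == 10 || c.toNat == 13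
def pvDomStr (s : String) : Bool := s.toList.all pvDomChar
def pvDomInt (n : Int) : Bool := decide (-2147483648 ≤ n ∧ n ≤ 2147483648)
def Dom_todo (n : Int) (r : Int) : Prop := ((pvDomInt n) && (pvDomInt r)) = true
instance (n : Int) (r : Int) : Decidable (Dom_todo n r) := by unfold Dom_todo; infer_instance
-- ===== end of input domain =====

-- B sorts the digits and rejects when a run of equal digits exceeds r (early exit),
-- instead of A's per-element list.count rescan; equivalence is about the return value.

-- ===== PORT A =====
-- int(ch) ported as ch.toNat - 48: exact for the digit characters str(n) yields when n ≥ 0 (Pre_)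
def todo (n : Int) (r : Int) : Bool :=
  let lst := (PySem.Int.toStr n).toList.map (fun c => ((c.toNat : Int) - 48))
  if lst.length < 4 then false
  else
    let lst2 := if lst.length = 4 then lst ++ [0] else lst
    lst2.all (fun i => !decide (((PySem.List.count lst2 i : Int)) > r))

-- ===== PORT B =====
-- the run-length scan over the sorted digits, with Source B's early return on run > r
def runScan (r : Int) : List Int → Option Int → Int → Bool
  | [], _, _ => true
  | d :: rest, prev, run =>
    let run' := if some d = prev then run + 1 else 1
    if run' > r then false else runScan r rest (some d) run'

def todo_alt (n : Int) (r : Int) : Bool :=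
  let digits := (PySem.Int.toStr n).toList.map (fun c => ((c.toNat : Int) - 48))
  if digits.length < 4 then false
  else
    let digits2 := if digits.length = 4 then digits ++ [0] else digits
    runScan r (PySem.List.sorted digits2 (fun x => x) false) none 0

-- ===== PRECONDITION & SPEC =====
-- Pre_ excludes n < 0, on which Python A raises ValueError (int('-') while building the digit list; B raises there too).
def Pre_todo (n : Int) (r : Int) : Prop := 0 ≤ n
instance (n : Int) (r : Int) : Decidable (Pre_todo n r) := by unfold Pre_todo; infer_instance
def pvWitness_todo : Int × Int := (1234, 2)

def Spec_todo (n : Int) (r : Int) (out : Bool) : Prop := out = todo_alt n r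
instance (n : Int) (r : Int) (out : Bool) : Decidable (Spec_todo n r out) := by unfold Spec_todo; infer_instance

-- ===== CLAIM (what is proved, stated in full; the proofs are below) =====
def Claim_equal_todo : Prop := ∀ (n : Int) (r : Int), Dom_todo n r → Pre_todo n r → Spec_todo n r (todo n r)

-- ===== LEMMAS AND PROOFS =====

-- invariant of the scan mid-run: prev = some p, run = k copies of p already seen, k ≤ r,
-- and every remaining element is ≥ p
lemma runScan_some (l : List Int) : ∀ (p k r : Int), l.Pairwise (· ≤ ·) → (∀ x ∈ l, p ≤ x) → k ≤ r →
    (runScan r l (some p) k = true ↔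
      ((l.count p : Int) + k ≤ r ∧ ∀ i ∈ l, i ≠ p → (l.count i : Int) ≤ r)) := by
  induction l with
  | nil =>
    intro p k r _ _ hk
    simp [runScan, hk]
  | cons d rest ih =>
    intro p k r hsort hge hk
    have hsort' : rest.Pairwise (· ≤ ·) := hsort.of_cons
    have hd : ∀ x ∈ rest, d ≤ x := fun x hx => (List.pairwise_cons.mp hsort).1 x hx
    by_cases hdp : d = p
    · subst hdp
      simp only [runScan, if_true]
      by_cases hr : k + 1 > r
      · simp only [if_pos hr]
        constructor
        · intro h; exact absurd h Bool.false_ne_true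
        · rintro ⟨h1, -⟩
          exfalso
          have : (1 : Int) ≤ ((d :: rest).count d : Int) := by
            have := List.count_pos_iff.mpr (List.mem_cons_self (a := d) (l := rest))
            exact_mod_cast this
          omega
      · simp only [if_neg hr]
        have hge' : ∀ x ∈ rest, d ≤ x := hd
        rw [ih d (k + 1) r hsort' hge' (by omega)]
        have hc : ((d :: rest).count d : Int) = (rest.count d : Int) + 1 := by
          simp
        constructor
        · rintro ⟨h1, h2⟩
          refine ⟨by omega, ?_⟩
          intro i hi hne
          have hi' : i ∈ rest := by
            rcases List.mem_cons.mp hi with h | h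
            · exact absurd h hne
            · exact h
          rw [List.count_cons_of_ne (Ne.symm hne)]; exact h2 i hi' hne
        · rintro ⟨h1, h2⟩
          refine ⟨by omega, ?_⟩
          intro i hi hne
          rw [← List.count_cons_of_ne (Ne.symm hne)]; exact h2 i (List.mem_cons_of_mem d hi) hne
    · have hpd : p < d := lt_of_le_of_ne (hge d (List.mem_cons_self)) (fun h => hdp h.symm)
      simp only [runScan, Option.some.injEq, hdp, if_false]
      have hpnotmem : p ∉ d :: rest := by
        intro hmem
        rcases List.mem_cons.mp hmem with h | h
        · exact absurd h.symm hdp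
        · exact absurd (hd p h) (by omega)
      have hcp : ((d :: rest).count p : Int) = 0 := by
        rw [List.count_eq_zero.mpr hpnotmem]; rfl
      by_cases hr : (1 : Int) > r
      · simp only [if_pos hr]
        constructor
        · intro h; exact absurd h Bool.false_ne_true
        · rintro ⟨-, h2⟩
          exfalso
          have hdi : (1 : Int) ≤ ((d :: rest).count d : Int) := by
            have := List.count_pos_iff.mpr (List.mem_cons_self (a := d) (l := rest))
            exact_mod_cast this
          have := h2 d (List.mem_cons_self) hdp
          omega
      · simp only [if_neg hr]
        rw [ih d 1 r hsort' hd (by omega)]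
        have hcd : ((d :: rest).count d : Int) = (rest.count d : Int) + 1 := by
          simp
        constructor
        · rintro ⟨h1, h2⟩
          refine ⟨by omega, ?_⟩
          intro i hi hne
          by_cases hid : i = d
          · subst hid; omega
          · have hi' : i ∈ rest := by
              rcases List.mem_cons.mp hi with h | h
              · exact absurd h hid
              · exact h
            rw [List.count_cons_of_ne (Ne.symm hid)]; exact h2 i hi' hid
        · rintro ⟨h1, h2⟩
          refine ⟨?_, ?_⟩
          · have := h2 d (List.mem_cons_self) hdp
            omega
          · intro i hi hne
            by_cases hip : i = p
            · subst hip
              have : (rest.count i : Int) ≤ ((d :: rest).count i : Int) := by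
                have := List.count_le_count_cons (b := d) (a := i) (l := rest)
                exact_mod_cast this
              omega
            · rw [← List.count_cons_of_ne (Ne.symm hne)]; exact h2 i (List.mem_cons_of_mem d hi) hip

-- the full scan on a sorted list decides "every element's multiplicity is ≤ r"
lemma runScan_none (l : List Int) (r : Int) (hsort : l.Pairwise (· ≤ ·)) :
    runScan r l none 0 = true ↔ ∀ i ∈ l, (l.count i : Int) ≤ r := by
  cases l with
  | nil => simp [runScan]
  | cons d rest =>
    have hsort' : rest.Pairwise (· ≤ ·) := hsort.of_cons
    have hd : ∀ x ∈ rest, d ≤ x := fun x hx => (List.pairwise_cons.mp hsort).1 x hx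
    have hcd : ((d :: rest).count d : Int) = (rest.count d : Int) + 1 := by
      simp
    simp only [runScan, reduceCtorEq, if_false]
    by_cases hr : (1 : Int) > r
    · simp only [if_pos hr]
      constructor
      · intro h; exact absurd h Bool.false_ne_true
      · intro h
        exfalso
        have := h d (List.mem_cons_self)
        omega
    · simp only [if_neg hr]
      rw [runScan_some rest d 1 r hsort' hd (by omega)]
      constructor
      · rintro ⟨h1, h2⟩
        intro i hi
        rcases List.mem_cons.mp hi with h | h
        · subst h; omega
        · by_cases hid : i = d
          · subst hid; omega
          · rw [List.count_cons_of_ne (Ne.symm hid)]; exact h2 i h hid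
      · intro h
        refine ⟨by have := h d (List.mem_cons_self); omega, ?_⟩
        intro i hi hne
        rw [← List.count_cons_of_ne (Ne.symm hne)]; exact h i (List.mem_cons_of_mem d hi)

theorem todo_spec_aux (n r : Int) : todo n r = todo_alt n r := by
  unfold todo todo_alt
  set ds := (PySem.Int.toStr n).toList.map (fun c => ((c.toNat : Int) - 48)) with hds
  by_cases h4 : ds.length < 4
  · simp [h4]
  · simp only [h4, if_false]
    set ds2 := if ds.length = 4 then ds ++ [0] else ds with hds2
    set sl := PySem.List.sorted ds2 (fun x => x) false with hsl
    have hperm : sl.Perm ds2 := PySem.List.sorted_perm ds2 (fun x => x) false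
    have hpw : sl.Pairwise (· ≤ ·) := PySem.List.sorted_pairwise ds2 (fun x => x)
    rw [Bool.eq_iff_iff, runScan_none sl r hpw]
    simp only [List.all_eq_true, PySem.List.count_eq, Bool.not_eq_true', decide_eq_false_iff_not,
      not_lt]
    constructor
    · intro h i hi
      rw [hperm.count_eq]
      exact h i (hperm.mem_iff.mp hi)
    · intro h i hi
      rw [← hperm.count_eq]
      exact h i (hperm.mem_iff.mpr hi)

-- ===== VERDICT (by name: the statement is the Claim_ definition above) =====
theorem todo_spec : Claim_equal_todo := by
  intro n r _ _
  exact todo_spec_aux n r
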